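-- pv_equiv track=rewrite | github.com/AlexNoske/PolyFind | PolyFind.py | polyEdge5
-- ===== SOURCE A (Python) =====
-- def polyEdge5(noNodesG1,noNodesG2):
--     constraints=[]
--     constraint="cnf(sml,axiom,t(Y,Y,X,X,X)=X"
--     if (noNodesG2<noNodesG1):
--         for i in range(noNodesG2,noNodesG1):
--             constraint = constraint + "|X=" + str(i)
--     elif (noNodesG1<noNodesG2):
--         for i in range(noNodesG1,noNodesG2):
--             constraint = constraint + "|X=" + str(i)
--     constraint = constraint + ").\n"
--     constraints.append(constraint)
--     constraint="cnf(sml,axiom,t(Y,X,Y,X,X)=X"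
--     if (noNodesG2<noNodesG1):
--         for i in range(noNodesG2,noNodesG1):
--             constraint = constraint + "|X=" + str(i)
--     elif (noNodesG1<noNodesG2):
--         for i in range(noNodesG1,noNodesG2):
--             constraint = constraint + "|X=" + str(i)
--     constraint = constraint + ").\n"
--     constraints.append(constraint)
--     constraint="cnf(sml,axiom,t(X,X,X,Y,X)=X"
--     if (noNodesG2<noNodesG1):
--         for i in range(noNodesG2,noNodesG1):
--             constraint = constraint + "|X=" + str(i)
--     elif (noNodesG1<noNodesG2):
--         for i in range(noNodesG1,noNodesG2):
--             constraint = constraint + "|X=" + str(i)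
--     constraint = constraint + ").\n"
--     constraints.append(constraint)
--     constraint="cnf(sml,axiom,t(X,Y,X,X,Y)=X"
--     if (noNodesG2<noNodesG1):
--         for i in range(noNodesG2,noNodesG1):
--             constraint = constraint + "|X=" + str(i)
--     elif (noNodesG1<noNodesG2):
--         for i in range(noNodesG1,noNodesG2):
--             constraint = constraint + "|X=" + str(i)
--     constraint = constraint + ").\n"
--     constraints.append(constraint)
--     return constraints
-- ===== SOURCE B (Python) =====
-- def polyEdge5(noNodesG1, noNodesG2):
--     # Build the shared "...).\n" tail once, back-to-front (highest i first),
--     # then attach it to the four pattern prefixes recursively.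
--     hi = noNodesG1 if noNodesG2 < noNodesG1 else noNodesG2
--     lo = noNodesG1 + noNodesG2 - hi
--     t = ").\n"
--     i = hi - 1
--     while i >= lo:
--         t = "|X=" + str(i) + t
--         i -= 1
--     def build(pats):
--         if not pats:
--             return []
--         return [pats[0] + t] + build(pats[1:])
--     return build(["cnf(sml,axiom,t(Y,Y,X,X,X)=X",
--                   "cnf(sml,axiom,t(Y,X,Y,X,X)=X",
--                   "cnf(sml,axiom,t(X,X,X,Y,X)=X",
--                   "cnf(sml,axiom,t(X,Y,X,X,Y)=X"])
-- ===== Notes on version B (the rewrite author's own statement) =====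
-- stated objective: alternative
-- what changed: Builds the shared terminator-plus-disjunction tail ONCE, back-to-front (a descending while loop prepending '|X=i' onto ').\n'), then attaches it to the four pattern prefixes by structural recursion over the prefix list, instead of A's four duplicated forward branch-and-append loops.
import Mathlib
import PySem

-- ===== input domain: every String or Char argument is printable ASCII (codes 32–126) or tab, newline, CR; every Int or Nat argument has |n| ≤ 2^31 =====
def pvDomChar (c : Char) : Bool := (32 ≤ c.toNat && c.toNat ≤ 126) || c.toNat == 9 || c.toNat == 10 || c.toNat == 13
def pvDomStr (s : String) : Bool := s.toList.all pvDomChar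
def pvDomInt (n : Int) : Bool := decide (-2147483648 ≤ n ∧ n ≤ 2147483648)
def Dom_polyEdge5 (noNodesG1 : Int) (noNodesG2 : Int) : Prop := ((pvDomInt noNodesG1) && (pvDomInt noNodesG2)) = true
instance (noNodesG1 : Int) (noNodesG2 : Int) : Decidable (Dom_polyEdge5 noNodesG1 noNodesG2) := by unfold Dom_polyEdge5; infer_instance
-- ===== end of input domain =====

-- B builds the shared tail once, back-to-front (prepending "|X=i" onto ").\n" from hi-1 down to lo), and attaches it to the four pattern prefixes by recursion over the prefix list; alternative decomposition, same cost.

-- ===== PORT A =====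
def polyEdge5 (noNodesG1 : Int) (noNodesG2 : Int) : List String :=
  let constraints : List String := []
  let constraint := "cnf(sml,axiom,t(Y,Y,X,X,X)=X"
  let constraint :=
    if noNodesG2 < noNodesG1 then
      (PySem.List.pyRange noNodesG2 noNodesG1 1).foldl (fun s i => s ++ "|X=" ++ PySem.Int.toStr i) constraint
    else if noNodesG1 < noNodesG2 then
      (PySem.List.pyRange noNodesG1 noNodesG2 1).foldl (fun s i => s ++ "|X=" ++ PySem.Int.toStr i) constraint
    else constraint
  let constraint := constraint ++ ").\n"
  let constraints := constraints ++ [constraint]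
  let constraint := "cnf(sml,axiom,t(Y,X,Y,X,X)=X"
  let constraint :=
    if noNodesG2 < noNodesG1 then
      (PySem.List.pyRange noNodesG2 noNodesG1 1).foldl (fun s i => s ++ "|X=" ++ PySem.Int.toStr i) constraint
    else if noNodesG1 < noNodesG2 then
      (PySem.List.pyRange noNodesG1 noNodesG2 1).foldl (fun s i => s ++ "|X=" ++ PySem.Int.toStr i) constraint
    else constraint
  let constraint := constraint ++ ").\n"
  let constraints := constraints ++ [constraint]
  let constraint := "cnf(sml,axiom,t(X,X,X,Y,X)=X"
  let constraint :=
    if noNodesG2 < noNodesG1 then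
      (PySem.List.pyRange noNodesG2 noNodesG1 1).foldl (fun s i => s ++ "|X=" ++ PySem.Int.toStr i) constraint
    else if noNodesG1 < noNodesG2 then
      (PySem.List.pyRange noNodesG1 noNodesG2 1).foldl (fun s i => s ++ "|X=" ++ PySem.Int.toStr i) constraint
    else constraint
  let constraint := constraint ++ ").\n"
  let constraints := constraints ++ [constraint]
  let constraint := "cnf(sml,axiom,t(X,Y,X,X,Y)=X"
  let constraint :=
    if noNodesG2 < noNodesG1 then
      (PySem.List.pyRange noNodesG2 noNodesG1 1).foldl (fun s i => s ++ "|X=" ++ PySem.Int.toStr i) constraint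
    else if noNodesG1 < noNodesG2 then
      (PySem.List.pyRange noNodesG1 noNodesG2 1).foldl (fun s i => s ++ "|X=" ++ PySem.Int.toStr i) constraint
    else constraint
  let constraint := constraint ++ ").\n"
  let constraints := constraints ++ [constraint]
  constraints

-- ===== PORT B =====
-- the descending while loop of Source B: prepend "|X=i" for i = start down to lo
def pvTailLoop (lo : Int) (i : Int) (t : String) : String :=
  if _h : lo ≤ i then pvTailLoop lo (i - 1) ("|X=" ++ PySem.Int.toStr i ++ t) else t
termination_by (i + 1 - lo).toNat
decreasing_by omega

-- the recursive build over the pattern prefixes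
def pvBuild (pats : List String) (t : String) : List String :=
  match pats with
  | [] => []
  | p :: ps => (p ++ t) :: pvBuild ps t

def polyEdge5_alt (noNodesG1 : Int) (noNodesG2 : Int) : List String :=
  let hi := if noNodesG2 < noNodesG1 then noNodesG1 else noNodesG2
  let lo := noNodesG1 + noNodesG2 - hi
  let t := pvTailLoop lo (hi - 1) ").\n"
  pvBuild ["cnf(sml,axiom,t(Y,Y,X,X,X)=X",
           "cnf(sml,axiom,t(Y,X,Y,X,X)=X",
           "cnf(sml,axiom,t(X,X,X,Y,X)=X",
           "cnf(sml,axiom,t(X,Y,X,X,Y)=X"] t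

-- ===== PRECONDITION & SPEC =====
def Spec_polyEdge5 (noNodesG1 : Int) (noNodesG2 : Int) (out : List String) : Prop := out = polyEdge5_alt noNodesG1 noNodesG2
instance (noNodesG1 : Int) (noNodesG2 : Int) (out : List String) : Decidable (Spec_polyEdge5 noNodesG1 noNodesG2 out) := by unfold Spec_polyEdge5; infer_instance

-- ===== CLAIM =====
def Claim_equal_polyEdge5 : Prop := ∀ (noNodesG1 : Int) (noNodesG2 : Int), Dom_polyEdge5 noNodesG1 noNodesG2 → Spec_polyEdge5 noNodesG1 noNodesG2 (polyEdge5 noNodesG1 noNodesG2)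

-- ===== LEMMAS AND PROOFS =====

lemma pvTailLoop_stop (lo i : Int) (t : String) (h : i < lo) : pvTailLoop lo i t = t := by
  rw [pvTailLoop]; simp [not_le.mpr h]

lemma pvTailLoop_step (lo i : Int) (t : String) (h : lo ≤ i) :
    pvTailLoop lo i t = pvTailLoop lo (i - 1) ("|X=" ++ PySem.Int.toStr i ++ t) := by
  rw [pvTailLoop]; simp [h]

-- A's forward fold followed by the terminator equals B's backward prepend loop
lemma fold_eq_tail (lo : Int) : ∀ (n : Nat) (hi : Int), hi - lo = n → ∀ (c t : String),
    (PySem.List.pyRange lo hi 1).foldl (fun s i => s ++ "|X=" ++ PySem.Int.toStr i) c ++ t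
      = c ++ pvTailLoop lo (hi - 1) t := by
  intro n
  induction n with
  | zero =>
      intro hi hn c t
      have h1 : PySem.List.pyRange lo hi 1 = [] := by
        rw [PySem.List.pyRange_one]
        have h0 : (hi - lo).toNat = 0 := by omega
        simp [h0]
      rw [h1]
      simp [pvTailLoop_stop lo (hi - 1) t (by omega)]
  | succ k ih =>
      intro hi hn c t
      have hlt : lo ≤ hi - 1 := by omega
      have hsplit : PySem.List.pyRange lo hi 1 = PySem.List.pyRange lo (hi - 1) 1 ++ [hi - 1] := by
        have := PySem.List.pyRange_one_succ_right (a := lo) (b := hi - 1) hlt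
        simpa using this
      rw [hsplit, List.foldl_append]
      simp only [List.foldl_cons, List.foldl_nil, String.append_assoc]
      rw [pvTailLoop_step lo (hi - 1) t hlt]
      simpa [String.append_assoc] using ih (hi - 1) (by omega) c ("|X=" ++ PySem.Int.toStr (hi - 1) ++ t)

-- ===== VERDICT =====
theorem polyEdge5_spec : Claim_equal_polyEdge5 := by
  intro g1 g2 _
  unfold Spec_polyEdge5 polyEdge5 polyEdge5_alt
  rcases lt_trichotomy g2 g1 with h | h | h
  · have hlo : g1 + g2 - g1 = g2 := by omega
    simp only [if_pos h, hlo,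
      fold_eq_tail g2 (g1 - g2).toNat g1 (by omega)]
    simp [pvBuild]
  · subst h
    have hlo : g2 + g2 - g2 = g2 := by omega
    simp only [lt_irrefl, if_false, hlo,
      pvTailLoop_stop g2 (g2 - 1) ").\n" (by omega)]
    simp [pvBuild]
  · have hlo : g1 + g2 - g2 = g1 := by omega
    simp only [if_neg (asymm h), if_pos h, hlo,
      fold_eq_tail g1 (g2 - g1).toNat g2 (by omega)]
    simp [pvBuild]
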